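-- pv_equiv track=rewrite | github.com/kunsevitandrew/CodeWars | 5-kyu/Divide-and-maximize/main.py | divide_and_multiply
-- ===== SOURCE A (Python) =====
-- def divide_and_multiply(arr):
--     size = len(arr)
--     degree = 0
--     while True:
--         d1 = degree
--         for i in range(size):
--             if arr[i] % 2 == 0:
--                 arr[i] //= 2
--                 degree += 1
--
--         if d1 == degree:
--             break
--
--     max_number_index = arr.index(max(arr))
--     arr[max_number_index] *= 2 ** degree
--
--     return sum(arr) % 1000000007
-- ===== SOURCE B (Python) =====
-- def divide_and_multiply(arr):
--     # One pass: strip each element's factors of 2 directly, accumulating the total degree;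
--     # then add the max's 2^degree boost in closed form. (Does not mutate arr, unlike A.)
--     degree = 0
--     odds = []
--     for x in arr:
--         while x % 2 == 0:
--             x //= 2
--             degree += 1
--         odds.append(x)
--     m = max(odds)
--     return (sum(odds) + m * (2 ** degree - 1)) % 1000000007
-- ===== Notes on version B (the rewrite author's own statement) =====
-- stated objective: alternative
-- what changed: B strips each element's factors of 2 in a single per-element pass (instead of A's repeated whole-array sweeps until a fixpoint) and adds the max's 2^degree boost in closed form instead of index/set; B also does not mutate arr.
import Mathlib
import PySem

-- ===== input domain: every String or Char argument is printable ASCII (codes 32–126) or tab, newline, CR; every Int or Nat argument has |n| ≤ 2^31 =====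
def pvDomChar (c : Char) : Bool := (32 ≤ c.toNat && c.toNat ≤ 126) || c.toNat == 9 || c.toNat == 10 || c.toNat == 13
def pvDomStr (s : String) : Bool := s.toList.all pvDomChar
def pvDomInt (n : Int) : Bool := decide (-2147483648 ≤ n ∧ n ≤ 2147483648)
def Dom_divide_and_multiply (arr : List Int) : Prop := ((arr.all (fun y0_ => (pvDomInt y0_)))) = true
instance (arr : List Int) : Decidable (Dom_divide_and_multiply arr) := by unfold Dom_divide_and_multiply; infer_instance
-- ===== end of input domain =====

-- B replaces A's repeated whole-array halving sweeps by one per-element strip of the 2-factors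
-- and a closed-form boost of the maximum (objective: alternative). A mutates its argument in place;
-- B does not — the equivalence proved here is about the RETURN value only.

-- ===== PORT A =====
-- one sweep of A's inner 'for i in range(size)' loop: halve each even entry, count divisions
def pvPassA : List Int → List Int × Nat
  | [] => ([], 0)
  | x :: xs =>
    let r := pvPassA xs
    if PySem.Int.mod x 2 = 0 then (PySem.Int.floordiv x 2 :: r.1, r.2 + 1)
    else (x :: r.1, r.2)

-- A's outer 'while True' loop; the fuel argument is a totality guard only (A's Python loops
-- forever when 0 ∈ arr — excluded by Pre_): under Pre_ the loop exits by its own d1 == degree test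
def pvLoopA : Nat → List Int → Nat → List Int × Nat
  | 0, arr, deg => (arr, deg)
  | fuel + 1, arr, deg =>
    let r := pvPassA arr
    if r.2 = 0 then (r.1, deg + r.2) else pvLoopA fuel r.1 (deg + r.2)

def divide_and_multiply (arr : List Int) : Int :=
  let r := pvLoopA ((arr.map Int.natAbs).sum + 1) arr 0
  match PySem.List.max? r.1 (fun y => y) with
  | none => 0   -- Python: max([]) raises ValueError; excluded by Pre_
  | some m =>
    match PySem.List.index? r.1 m with
    | none => 0   -- unreachable: the max is a member of the list
    | some i => PySem.Int.mod ((r.1.set i (m * 2 ^ r.2)).sum) 1000000007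

-- ===== PORT B =====
-- B's inner 'while x % 2 == 0' loop; fuel is a totality guard only (x = 0 is excluded by Pre_)
def pvStripB : Nat → Int → Nat → Int × Nat
  | 0, x, d => (x, d)
  | fuel + 1, x, d =>
    if PySem.Int.mod x 2 = 0 then pvStripB fuel (PySem.Int.floordiv x 2) (d + 1) else (x, d)

-- B's single 'for x in arr' loop, threading (odds, degree)
def pvCollectB : List Int → List Int → Nat → List Int × Nat
  | [], odds, deg => (odds, deg)
  | x :: xs, odds, deg =>
    let r := pvStripB (x.natAbs + 1) x deg
    pvCollectB xs (odds ++ [r.1]) r.2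

def divide_and_multiply_alt (arr : List Int) : Int :=
  let r := pvCollectB arr [] 0
  match PySem.List.max? r.1 (fun y => y) with
  | none => 0   -- max([]) raises ValueError; excluded by Pre_
  | some m => PySem.Int.mod (r.1.sum + m * (2 ^ r.2 - 1)) 1000000007

-- ===== PRECONDITION & SPEC =====
-- Pre_ excludes the empty list (A raises ValueError at max(arr)) and lists containing 0
-- (A's while loop divides 0 by 2 forever and never returns).
def Pre_divide_and_multiply (arr : List Int) : Prop := arr ≠ [] ∧ (0 : Int) ∉ arr
instance (arr : List Int) : Decidable (Pre_divide_and_multiply arr) := by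
  unfold Pre_divide_and_multiply; infer_instance

def pvWitness_divide_and_multiply : List Int := [6, -3, 8]

def Spec_divide_and_multiply (arr : List Int) (out : Int) : Prop := out = divide_and_multiply_alt arr
instance (arr : List Int) (out : Int) : Decidable (Spec_divide_and_multiply arr out) := by
  unfold Spec_divide_and_multiply; infer_instance

-- ===== CLAIM (what is proved, stated in full; the proofs are below) =====
def Claim_equal_divide_and_multiply : Prop := ∀ (arr : List Int), Dom_divide_and_multiply arr → Pre_divide_and_multiply arr → Spec_divide_and_multiply arr (divide_and_multiply arr)

-- ===== LEMMAS AND PROOFS =====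

-- 2-adic valuation of a Nat (proof-side reference function)
def pvV2 (n : Nat) : Nat :=
  if h : n ≠ 0 ∧ n % 2 = 0 then pvV2 (n / 2) + 1 else 0
decreasing_by exact Nat.div_lt_self (Nat.pos_of_ne_zero h.1) one_lt_two

lemma pvV2_le (n : Nat) : pvV2 n ≤ n := by
  induction n using Nat.strong_induction_on with
  | _ n ih =>
    rw [pvV2]
    split
    · rename_i h
      have := ih (n / 2) (Nat.div_lt_self (Nat.pos_of_ne_zero h.1) one_lt_two)
      omega
    · omega

lemma even_halve (x : Int) (hx : x ≠ 0) (he : PySem.Int.mod x 2 = 0) :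
    2 * PySem.Int.floordiv x 2 = x ∧ PySem.Int.floordiv x 2 ≠ 0 ∧
      (PySem.Int.floordiv x 2).natAbs = x.natAbs / 2 ∧ x.natAbs % 2 = 0 := by
  have hdvd : (2 : Int) ∣ x := (PySem.Int.mod_eq_zero_iff_dvd x 2).mp he
  obtain ⟨k, hk⟩ := hdvd
  have hfd : PySem.Int.floordiv x 2 = k := by
    rw [PySem.Int.floordiv_eq_ediv_of_pos (by norm_num), hk,
      Int.mul_ediv_cancel_left _ (by norm_num)]
  subst hk
  refine ⟨by rw [hfd], by rw [hfd]; rintro rfl; simp at hx, ?_, ?_⟩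
  · rw [hfd, Int.natAbs_mul]
    simp
  · rw [Int.natAbs_mul]
    simp

lemma v2_int_even (x : Int) (hx : x ≠ 0) (he : PySem.Int.mod x 2 = 0) :
    pvV2 x.natAbs = pvV2 (PySem.Int.floordiv x 2).natAbs + 1 := by
  obtain ⟨_, _, h3, h4⟩ := even_halve x hx he
  rw [h3]
  conv_lhs => rw [pvV2]
  rw [dif_pos ⟨by simpa using hx, h4⟩]

lemma v2_int_odd (x : Int) (ho : ¬ PySem.Int.mod x 2 = 0) : pvV2 x.natAbs = 0 := by
  have : x.natAbs % 2 ≠ 0 := by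
    intro h
    apply ho
    rw [PySem.Int.mod_eq_zero_iff_dvd]
    exact Int.natAbs_dvd_natAbs.mp (Nat.dvd_of_mod_eq_zero h)
  rw [pvV2, dif_neg (by omega)]

-- odd part of an Int (proof-side reference function)
def pvOdd (x : Int) : Int :=
  if h : x ≠ 0 ∧ PySem.Int.mod x 2 = 0 then pvOdd (PySem.Int.floordiv x 2) else x
termination_by x.natAbs
decreasing_by
  have := even_halve x h.1 h.2
  have hne := this.2.1
  rw [this.2.2.1]
  have : x.natAbs ≠ 0 := by simpa using h.1
  omega

lemma odd_int_even (x : Int) (hx : x ≠ 0) (he : PySem.Int.mod x 2 = 0) :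
    pvOdd x = pvOdd (PySem.Int.floordiv x 2) := by
  rw [pvOdd, dif_pos ⟨hx, he⟩]

lemma odd_int_odd (x : Int) (ho : ¬ PySem.Int.mod x 2 = 0) : pvOdd x = x := by
  rw [pvOdd, dif_neg (by tauto)]

def pvSumV2 (arr : List Int) : Nat := (arr.map (fun x => pvV2 x.natAbs)).sum

lemma stripB_spec (fuel : Nat) (x : Int) (d : Nat) (hx : x ≠ 0)
    (hf : pvV2 x.natAbs < fuel) : pvStripB fuel x d = (pvOdd x, d + pvV2 x.natAbs) := by
  induction fuel generalizing x d with
  | zero => omega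
  | succ fuel ih =>
    rw [pvStripB]
    by_cases he : PySem.Int.mod x 2 = 0
    · rw [if_pos he]
      obtain ⟨_, hne, _, _⟩ := even_halve x hx he
      have hv := v2_int_even x hx he
      rw [ih _ _ hne (by omega), odd_int_even x hx he, hv]
      simp [Nat.add_assoc, Nat.add_comm 1]
    · rw [if_neg he, odd_int_odd x he, v2_int_odd x he]
      simp

lemma collectB_spec (arr odds : List Int) (deg : Nat) (h : (0 : Int) ∉ arr) :
    pvCollectB arr odds deg = (odds ++ arr.map pvOdd, deg + pvSumV2 arr) := by
  induction arr generalizing odds deg with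
  | nil => simp [pvCollectB, pvSumV2]
  | cons x xs ih =>
    have hx : x ≠ 0 := by intro hx0; exact h (by simp [hx0])
    have hxs : (0 : Int) ∉ xs := fun hm => h (List.mem_cons_of_mem _ hm)
    rw [pvCollectB, stripB_spec _ _ _ hx (Nat.lt_succ_of_le (pvV2_le _)), ih _ _ hxs]
    simp [pvSumV2, Nat.add_assoc]

lemma passA_spec (arr : List Int) (h : (0 : Int) ∉ arr) :
    (pvPassA arr).1.map pvOdd = arr.map pvOdd ∧ (0 : Int) ∉ (pvPassA arr).1 ∧
      pvSumV2 (pvPassA arr).1 + (pvPassA arr).2 = pvSumV2 arr := by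
  induction arr with
  | nil => simp [pvPassA, pvSumV2]
  | cons x xs ih =>
    have hx : x ≠ 0 := by intro hx0; exact h (by simp [hx0])
    have hxs : (0 : Int) ∉ xs := fun hm => h (List.mem_cons_of_mem _ hm)
    obtain ⟨ih1, ih2, ih3⟩ := ih hxs
    by_cases he : PySem.Int.mod x 2 = 0
    · obtain ⟨_, hne, _, _⟩ := even_halve x hx he
      have hv := v2_int_even x hx he
      have hunf : pvPassA (x :: xs) =
          (PySem.Int.floordiv x 2 :: (pvPassA xs).1, (pvPassA xs).2 + 1) := by
        simp only [pvPassA, if_pos he]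
      rw [hunf]
      refine ⟨?_, ?_, ?_⟩
      · simp only [List.map_cons, ih1, ← odd_int_even x hx he]
      · simp only [List.mem_cons]
        rintro (h0 | h0)
        · exact hne h0.symm
        · exact ih2 h0
      · simp only [pvSumV2, List.map_cons, List.sum_cons] at *
        omega
    · have hunf : pvPassA (x :: xs) = (x :: (pvPassA xs).1, (pvPassA xs).2) := by
        simp only [pvPassA, if_neg he]
      rw [hunf]
      refine ⟨?_, ?_, ?_⟩
      · simp only [List.map_cons, ih1]
      · simp only [List.mem_cons]
        rintro (h0 | h0)
        · exact hx h0.symm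
        · exact ih2 h0
      · simp only [pvSumV2, List.map_cons, List.sum_cons] at *
        omega

lemma passA_fix (arr : List Int) (h : (0 : Int) ∉ arr) (hc : (pvPassA arr).2 = 0) :
    (pvPassA arr).1 = arr ∧ pvSumV2 arr = 0 := by
  induction arr with
  | nil => simp [pvPassA, pvSumV2]
  | cons x xs ih =>
    have hxs : (0 : Int) ∉ xs := fun hm => h (List.mem_cons_of_mem _ hm)
    by_cases he : PySem.Int.mod x 2 = 0
    · have hunf : pvPassA (x :: xs) =
          (PySem.Int.floordiv x 2 :: (pvPassA xs).1, (pvPassA xs).2 + 1) := by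
        simp only [pvPassA, if_pos he]
      rw [hunf] at hc
      simp at hc
    · have hunf : pvPassA (x :: xs) = (x :: (pvPassA xs).1, (pvPassA xs).2) := by
        simp only [pvPassA, if_neg he]
      rw [hunf] at hc ⊢
      obtain ⟨h1, h2⟩ := ih hxs hc
      refine ⟨by rw [h1], ?_⟩
      simp only [pvSumV2, List.map_cons, List.sum_cons] at *
      rw [v2_int_odd x he]
      omega

lemma map_odd_of_sumv2_zero (arr : List Int) (h2 : pvSumV2 arr = 0) :
    arr.map pvOdd = arr := by
  induction arr with
  | nil => simp
  | cons x xs ih =>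
    simp only [pvSumV2, List.map_cons, List.sum_cons] at h2 ⊢
    have hx : pvV2 x.natAbs = 0 := by omega
    have ho : pvOdd x = x := by
      by_cases he : PySem.Int.mod x 2 = 0
      · by_cases hx0 : x = 0
        · subst hx0; rw [pvOdd]; simp
        · rw [v2_int_even x hx0 he] at hx; omega
      · exact odd_int_odd x he
    rw [ho, ih (by simp only [pvSumV2]; omega)]

lemma loopA_spec (fuel : Nat) (arr : List Int) (deg : Nat) (h : (0 : Int) ∉ arr)
    (hf : pvSumV2 arr < fuel) :
    pvLoopA fuel arr deg = (arr.map pvOdd, deg + pvSumV2 arr) := by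
  induction fuel generalizing arr deg with
  | zero => omega
  | succ fuel ih =>
    rw [pvLoopA]
    obtain ⟨p1, p2, p3⟩ := passA_spec arr h
    by_cases hc : (pvPassA arr).2 = 0
    · obtain ⟨f1, f2⟩ := passA_fix arr h hc
      simp only [hc, f1, f2, map_odd_of_sumv2_zero arr f2]
      simp
    · rw [if_neg hc]
      rw [ih _ _ p2 (by omega), p1]
      congr 1
      omega

lemma sum_set_int (l : List Int) (i : Nat) (v : Int) (h : i < l.length) :
    (l.set i v).sum = l.sum - l[i] + v := by
  induction l generalizing i with
  | nil => simp at h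
  | cons x xs ih =>
    cases i with
    | zero => simp; ring
    | succ j =>
      simp only [List.set_cons_succ, List.sum_cons, List.getElem_cons_succ]
      rw [ih j (by simpa using h)]
      ring

lemma v2_le_natAbs_sum (arr : List Int) : pvSumV2 arr ≤ (arr.map Int.natAbs).sum := by
  induction arr with
  | nil => simp [pvSumV2]
  | cons x xs ih =>
    simp only [pvSumV2, List.map_cons, List.sum_cons] at *
    have := pvV2_le x.natAbs
    omega

-- ===== VERDICT (by name: the statement is the Claim_ definition above) =====
theorem divide_and_multiply_spec : Claim_equal_divide_and_multiply := by
  intro arr _ hpre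
  obtain ⟨hne, h0⟩ := hpre
  unfold Spec_divide_and_multiply divide_and_multiply divide_and_multiply_alt
  rw [loopA_spec _ _ _ h0 (Nat.lt_succ_of_le (v2_le_natAbs_sum arr)),
    collectB_spec _ _ _ h0]
  simp only [List.nil_append]
  set L := arr.map pvOdd with hL
  have hLne : L ≠ [] := by simpa [hL] using hne
  cases hmax : PySem.List.max? L (fun y => y) with
  | none => exact absurd ((PySem.List.max?_eq_none_iff L (fun y => y)).mp hmax) hLne
  | some m =>
    have hmem : m ∈ L := PySem.List.max?_mem hmax
    cases hidx : PySem.List.index? L m with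
    | none => exact absurd hmem ((PySem.List.index?_eq_none_iff L m).mp hidx)
    | some i =>
      obtain ⟨hk, hget, _⟩ := PySem.List.getElem_of_index?_eq_some hidx
      dsimp only
      rw [hidx]
      dsimp only
      rw [sum_set_int L i _ hk, hget]
      congr 1
      ring
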